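-- pv_equiv track=rewrite | github.com/JianJX/algorithms | algorithm/test.py | pair_sum_count
-- ===== SOURCE A (Python) =====
-- def pair_sum_count(a, m, k):
--     count = 0
--     for i in range(len(a)):
--         if (len(a) - i) > (m - 1):
--             sub_array = []
--             for j in range(m):
--                 sub_array.append(a[i + j])
--             firstMax = max(sub_array)
--             sub_array.remove(firstMax)
--             secondMax = max(sub_array)
--             if (firstMax + secondMax) >= k:
--                 count += 1
--     return count
-- ===== SOURCE B (Python) =====
-- def _push(p, x):
--     # insert x into a (top, second) summary
--     hi, lo = p
--     if x > hi:
--         return (x, hi)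
--     if lo is None or x > lo:
--         return (hi, x)
--     return p
--
--
-- def _merge(p, q):
--     # top two of the union of two (top, second) summaries
--     hi, lo = p
--     for x in (q[0], q[1]):
--         if x is not None:
--             if x > hi:
--                 hi, lo = x, hi
--             elif lo is None or x > lo:
--                 lo = x
--     return (hi, lo)
--
--
-- def pair_sum_count(a, m, k):
--     # Block decomposition: every length-m window is a block suffix followed by
--     # the next block's prefix, so precomputed per-block prefix/suffix top-2
--     # summaries answer each window in O(1): O(n) total instead of O(n*m).
--     n = len(a)
--     if m < 2 or n < m:
--         return 0
--     pre = []  # pre[j] = top-2 of a[m*(j//m) : j+1]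
--     for j in range(n):
--         if j % m == 0:
--             pre.append((a[j], None))
--         else:
--             pre.append(_push(pre[-1], a[j]))
--     suf_r = []  # built back to front; suf_r reversed gives suf[j] = top-2 of a[j : min(m*(j//m)+m, n)]
--     for j in range(n - 1, -1, -1):
--         if j % m == m - 1 or j == n - 1:
--             suf_r.append((a[j], None))
--         else:
--             suf_r.append(_push(suf_r[-1], a[j]))
--     suf = suf_r[::-1]
--     count = 0
--     for i in range(n - m + 1):
--         e = i + m - 1
--         if i % m == 0:
--             hi, lo = pre[e]
--         else:
--             hi, lo = _merge(suf[i], pre[e])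
--         if hi + lo >= k:
--             count += 1
--     return count
-- ===== Notes on version B (the rewrite author's own statement) =====
-- stated objective: faster
-- what changed: Replaced the per-window rebuild (copy m elements, max, remove, max for every start) by the block-decomposition trick: per-block prefix and suffix top-2 summaries are precomputed in one forward and one backward pass, and each window's two largest are read off in O(1) as the merge of a block suffix summary with the next block's prefix summary.
import Mathlib
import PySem

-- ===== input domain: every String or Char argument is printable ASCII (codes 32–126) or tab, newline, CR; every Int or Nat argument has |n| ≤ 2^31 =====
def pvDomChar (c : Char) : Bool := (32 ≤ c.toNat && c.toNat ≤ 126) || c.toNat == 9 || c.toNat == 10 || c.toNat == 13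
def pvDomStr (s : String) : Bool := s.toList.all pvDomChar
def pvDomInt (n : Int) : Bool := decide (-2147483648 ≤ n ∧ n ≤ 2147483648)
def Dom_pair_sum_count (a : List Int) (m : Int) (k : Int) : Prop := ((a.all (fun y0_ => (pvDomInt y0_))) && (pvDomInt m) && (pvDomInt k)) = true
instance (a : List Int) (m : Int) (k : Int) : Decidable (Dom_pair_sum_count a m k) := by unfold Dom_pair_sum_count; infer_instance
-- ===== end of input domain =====

-- B replaces A's per-window rebuild (copy m elements, max, remove, max) by per-block
-- prefix/suffix top-2 summaries computed in two linear passes, answering each window in O(1).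

-- ===== PORT A =====
def pair_sum_count (a : List Int) (m : Int) (k : Int) : Int :=
  (PySem.List.pyRange 0 (a.length : Int) 1).foldl (fun count i =>
    if ((a.length : Int) - i) > (m - 1) then
      let sub_array := (PySem.List.pyRange 0 m 1).foldl
        (fun s j => s ++ [PySem.List.pyGetD a (i + j) 0]) []
      match PySem.List.max? sub_array (fun y => y) with
      | none => count            -- max([]) raises ValueError: excluded by Pre_
      | some firstMax =>
        match PySem.List.remove? sub_array firstMax with
        | none => count
        | some rest =>
          match PySem.List.max? rest (fun y => y) with
          | none => count        -- max([]) raises ValueError: excluded by Pre_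
          | some secondMax => if firstMax + secondMax ≥ k then count + 1 else count
    else count) 0

-- ===== PORT B =====
-- _push(p, x): insert x into a (top, second) summary
def pushT2 (p : Int × Option Int) (x : Int) : Int × Option Int :=
  if x > p.1 then (x, some p.1)
  else match p.2 with
    | none => (p.1, some x)
    | some lo => if x > lo then (p.1, some x) else p

-- _merge(p, q): the loop body over (q[0], q[1]) is _push's if/elif chain
def mergeT2 (p q : Int × Option Int) : Int × Option Int :=
  [some q.1, q.2].foldl (fun s ox =>
    match ox with
    | none => s
    | some x => pushT2 s x) p

def pair_sum_count_alt (a : List Int) (m : Int) (k : Int) : Int :=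
  let n : Int := a.length
  if m < 2 ∨ n < m then 0
  else
    -- pre[j] = top-2 of a[m*(j//m) : j+1]
    let pre := (PySem.List.pyRange 0 n 1).foldl (fun pre j =>
      if PySem.Int.mod j m = 0 then pre ++ [(PySem.List.pyGetD a j 0, (none : Option Int))]
      else pre ++ [pushT2 (PySem.List.pyGetD pre (-1) (0, none)) (PySem.List.pyGetD a j 0)]) []
    let sufR := (PySem.List.pyRange (n - 1) (-1) (-1)).foldl (fun s j =>
      if PySem.Int.mod j m = m - 1 ∨ j = n - 1 then s ++ [(PySem.List.pyGetD a j 0, (none : Option Int))]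
      else s ++ [pushT2 (PySem.List.pyGetD s (-1) (0, none)) (PySem.List.pyGetD a j 0)]) []
    let suf := sufR.reverse    -- suf_r[::-1]
    (PySem.List.pyRange 0 (n - m + 1) 1).foldl (fun count i =>
      let e := i + m - 1
      let p := if PySem.Int.mod i m = 0 then PySem.List.pyGetD pre e (0, none)
               else mergeT2 (PySem.List.pyGetD suf i (0, none)) (PySem.List.pyGetD pre e (0, none))
      match p.2 with
      | none => count    -- unreachable: every length-m window summary (m ≥ 2) carries a second value
      | some lo => if p.1 + lo ≥ k then count + 1 else count) 0

-- ===== PRECONDITION & SPEC =====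
-- Pre_ excludes exactly the inputs on which A raises ValueError (nonempty a with m ≤ 1:
-- max() of an empty or emptied window); A returns on every other input.
def Pre_pair_sum_count (a : List Int) (m : Int) (k : Int) : Prop := a = [] ∨ 2 ≤ m
instance (a : List Int) (m : Int) (k : Int) : Decidable (Pre_pair_sum_count a m k) := by
  unfold Pre_pair_sum_count; infer_instance
def pvWitness_pair_sum_count : List Int × Int × Int := ([3, 1, 4, 1, 5], 3, 7)

def Spec_pair_sum_count (a : List Int) (m : Int) (k : Int) (out : Int) : Prop := out = pair_sum_count_alt a m k
instance (a : List Int) (m : Int) (k : Int) (out : Int) : Decidable (Spec_pair_sum_count a m k out) := by unfold Spec_pair_sum_count; infer_instance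

-- ===== CLAIM (what is proved, stated in full; the proofs are below) =====
def Claim_equal_pair_sum_count : Prop := ∀ (a : List Int) (m : Int) (k : Int), Dom_pair_sum_count a m k → Pre_pair_sum_count a m k → Spec_pair_sum_count a m k (pair_sum_count a m k)

-- ===== LEMMAS AND PROOFS =====

def Mx : List Int → Int
  | [] => 0
  | h :: t => t.foldl max h

def M2 (l : List Int) : Int := Mx (l.erase (Mx l))

def T2 (l : List Int) : Int × Option Int :=
  (Mx l, if l.length ≤ 1 then none else some (M2 l))

theorem foldl_max_eq (v : List Int) (c : Int) (h : v ≠ []) : v.foldl max c = max c (Mx v) := by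
  induction v generalizing c with
  | nil => exact absurd rfl h
  | cons x t ih =>
    simp only [List.foldl_cons]
    cases t with
    | nil => simp [Mx]
    | cons y s =>
      rw [ih _ (by simp)]
      have hMx : Mx (x :: y :: s) = max x (Mx (y :: s)) := by
        show List.foldl max x (y :: s) = _
        rw [ih _ (by simp)]
      rw [hMx, max_assoc]

theorem Mx_append (u v : List Int) (hu : u ≠ []) (hv : v ≠ []) :
    Mx (u ++ v) = max (Mx u) (Mx v) := by
  cases u with
  | nil => exact absurd rfl hu
  | cons h t =>
    show (t ++ v).foldl max h = _
    rw [List.foldl_append, foldl_max_eq v _ hv]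
    rfl

theorem Mx_mem (l : List Int) (h : l ≠ []) : Mx l ∈ l := by
  cases l with
  | nil => exact absurd rfl h
  | cons x t =>
    rcases PySem.List.foldl_max_mem t x with h1 | h1
    · simp [Mx, h1]
    · exact List.mem_cons_of_mem _ h1

theorem le_Mx (l : List Int) (y : Int) (hy : y ∈ l) : y ≤ Mx l := by
  cases l with
  | nil => simp at hy
  | cons x t =>
    rcases List.mem_cons.1 hy with rfl | h1
    · exact (PySem.List.le_foldl_max t y).1
    · exact (PySem.List.le_foldl_max t x).2 y h1

theorem Mx_perm {l₁ l₂ : List Int} (h : l₁.Perm l₂) : Mx l₁ = Mx l₂ := by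
  cases l₁ with
  | nil => rw [h.nil_eq.symm]  -- hmm check
  | cons x t =>
    have h₂ : l₂ ≠ [] := by
      intro he; rw [he] at h; exact absurd h.length_eq (by simp)
    exact le_antisymm
      (le_Mx _ _ (h.mem_iff.1 (Mx_mem _ (by simp))))
      (le_Mx _ _ (h.mem_iff.2 (Mx_mem _ h₂)))

theorem M2_le_Mx (l : List Int) (h : 2 ≤ l.length) : M2 l ≤ Mx l := by
  have hne : l ≠ [] := by intro he; rw [he] at h; simp at h
  have h1 : (l.erase (Mx l)).length = l.length - 1 := List.length_erase_of_mem (Mx_mem l hne)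
  have h2 : l.erase (Mx l) ≠ [] := by
    intro he; rw [he] at h1; simp at h1; omega
  exact le_Mx _ _ (List.mem_of_mem_erase (Mx_mem _ h2))

-- erase of max on an append
theorem erase_Mx_append_right (u v : List Int) (hu : u ≠ []) (hv : v ≠ []) (h : Mx u < Mx v) :
    (u ++ v).erase (Mx (u ++ v)) = u ++ v.erase (Mx v) := by
  rw [Mx_append u v hu hv, max_eq_right h.le]
  exact List.erase_append_right _ (fun hmem => absurd (le_Mx u _ hmem) (not_le.2 h))

theorem erase_Mx_append_left (u v : List Int) (hu : u ≠ []) (hv : v ≠ []) (h : Mx v ≤ Mx u) :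
    (u ++ v).erase (Mx (u ++ v)) = u.erase (Mx u) ++ v := by
  rw [Mx_append u v hu hv, max_eq_left h]
  exact List.erase_append_left _ (Mx_mem u hu)

theorem T2_single (x : Int) : T2 [x] = (x, none) := rfl

theorem T2_two (l : List Int) (h : 2 ≤ l.length) : T2 l = (Mx l, some (M2 l)) := by
  simp [T2]; omega

theorem push_T2 (l : List Int) (x : Int) (hl : l ≠ []) :
    pushT2 (T2 l) x = T2 (l ++ [x]) := by
  have hlen : 1 ≤ l.length := by have := List.length_pos_iff.2 hl; omega
  have hlen2 : 2 ≤ (l ++ [x]).length := by simp; omega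
  rw [T2_two _ hlen2]
  by_cases hx : Mx l < x
  · -- x becomes the max
    have hMx : Mx (l ++ [x]) = x := by
      rw [Mx_append l [x] hl (by simp)]; simp [Mx]; exact hx.le
    have hM2 : M2 (l ++ [x]) = Mx l := by
      unfold M2
      rw [erase_Mx_append_right l [x] hl (by simp) (by simpa [Mx] using hx)]
      simp [Mx]  -- [x].erase x = [] then l ++ [] = l
    rw [hMx, hM2]
    simp [pushT2, T2, hx]
  · rw [not_lt] at hx
    have hMx : Mx (l ++ [x]) = Mx l := by
      rw [Mx_append l [x] hl (by simp)]; simp [Mx]; exact hx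
    have herase : (l ++ [x]).erase (Mx (l ++ [x])) = l.erase (Mx l) ++ [x] :=
      erase_Mx_append_left l [x] hl (by simp) (by simpa [Mx] using hx)
    rcases Nat.lt_or_ge l.length 2 with h1 | h1
    · -- l is a singleton
      obtain ⟨y, rfl⟩ : ∃ y, l = [y] := by
        cases l with
        | nil => exact absurd rfl hl
        | cons a t => cases t with
          | nil => exact ⟨a, rfl⟩
          | cons b s => simp at h1
      have : Mx [y] = y := rfl
      rw [hMx]
      have hM2 : M2 ([y] ++ [x]) = x := by
        unfold M2; rw [herase]; simp [Mx]
      rw [hM2]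
      simp [pushT2, T2, Mx, not_lt.2 (by simpa [Mx] using hx)]
    · have hM2 : M2 (l ++ [x]) = max (M2 l) x := by
        unfold M2
        rw [herase]
        by_cases he : l.erase (Mx l) = []
        · exfalso
          have := List.length_erase_of_mem (Mx_mem l hl)
          rw [he] at this; simp at this; omega
        · rw [Mx_append _ [x] he (by simp)]; simp [Mx]
      rw [hMx, hM2, T2_two l h1]
      simp only [pushT2]
      rw [if_neg (not_lt.2 hx)]
      by_cases hx2 : x > M2 l
      · simp [hx2, max_eq_right hx2.le]
      · simp [hx2, max_eq_left (not_lt.1 hx2)]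


theorem T2_perm {l₁ l₂ : List Int} (h : l₁.Perm l₂) : T2 l₁ = T2 l₂ := by
  unfold T2 M2
  rw [Mx_perm h, h.length_eq, Mx_perm ((List.Perm.erase (Mx l₂) h))]

theorem merge_T2 (u v : List Int) (hu : u ≠ []) (hv : v ≠ []) :
    mergeT2 (T2 u) (T2 v) = T2 (u ++ v) := by
  rcases Nat.lt_or_ge v.length 2 with h1 | h1
  · obtain ⟨y, rfl⟩ : ∃ y, v = [y] := by
      cases v with
      | nil => exact absurd rfl hv
      | cons a t => cases t with
        | nil => exact ⟨a, rfl⟩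
        | cons b s => simp at h1
    show pushT2 (T2 u) (T2 [y]).1 = _
    rw [T2_single]
    exact push_T2 u y hu
  · rw [T2_two v h1]
    show pushT2 (pushT2 (T2 u) (Mx v)) (M2 v) = _
    have hu1 : u ++ [Mx v] ≠ [] := by simp
    rw [push_T2 u (Mx v) hu, push_T2 _ (M2 v) hu1]
    have hassoc : u ++ [Mx v] ++ [M2 v] = u ++ [Mx v, M2 v] := by simp
    rw [hassoc]
    -- T2 (u ++ [Mx v, M2 v]) = T2 (u ++ v)
    have hMxw : Mx [Mx v, M2 v] = Mx v := by
      show max (Mx v) (M2 v) = Mx v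
      exact max_eq_left (M2_le_Mx v h1)
    have hlen2 : 2 ≤ (u ++ [Mx v, M2 v]).length := by simp
    have hlenv : 2 ≤ (u ++ v).length := by
      have := List.length_pos_iff.2 hu
      simp; omega
    rw [T2_two _ hlen2, T2_two _ hlenv]
    have hMx : Mx (u ++ [Mx v, M2 v]) = Mx (u ++ v) := by
      rw [Mx_append u _ hu (by simp), Mx_append u v hu hv, hMxw]
    have hM2 : M2 (u ++ [Mx v, M2 v]) = M2 (u ++ v) := by
      show Mx ((u ++ [Mx v, M2 v]).erase (Mx (u ++ [Mx v, M2 v]))) =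
           Mx ((u ++ v).erase (Mx (u ++ v)))
      by_cases hcmp : Mx v ≤ Mx u
      · rw [erase_Mx_append_left u _ hu (by simp) (by rw [hMxw]; exact hcmp),
            erase_Mx_append_left u v hu hv hcmp]
        by_cases he : u.erase (Mx u) = []
        · rw [he, List.nil_append, List.nil_append, hMxw]
        · rw [Mx_append _ _ he (by simp), Mx_append _ v he hv, hMxw]
      · rw [not_le] at hcmp
        rw [erase_Mx_append_right u _ hu (by simp) (by rw [hMxw]; exact hcmp),
            erase_Mx_append_right u v hu hv hcmp]
        have hev : v.erase (Mx v) ≠ [] := by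
          intro he
          have := List.length_erase_of_mem (Mx_mem v hv)
          rw [he] at this; simp at this; omega
        rw [hMxw, List.erase_cons_head, Mx_append u _ hu (by simp),
            Mx_append u _ hu hev]
        rfl
    rw [hMx, hM2]

-- segment a[lo:hi]
def sg (a : List Int) (lo hi : Nat) : List Int := (a.drop lo).take (hi - lo)

theorem sg_length (a : List Int) (lo hi : Nat) (h1 : lo ≤ hi) (h2 : hi ≤ a.length) :
    (sg a lo hi).length = hi - lo := by
  simp [sg]; omega

theorem sg_ne_nil (a : List Int) (lo hi : Nat) (h1 : lo < hi) (h2 : lo < a.length) :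
    sg a lo hi ≠ [] := by
  have : (sg a lo hi).length ≠ 0 := by simp [sg]; omega
  intro he; rw [he] at this; simp at this

theorem sg_cons (a : List Int) (j hi : Nat) (h1 : j < hi) (h2 : j < a.length) :
    sg a j hi = a[j] :: sg a (j + 1) hi := by
  unfold sg
  rw [List.drop_eq_getElem_cons h2]
  have h3 : hi - j = (hi - (j + 1)) + 1 := by omega
  rw [h3, List.take_succ_cons]

theorem sg_singleton (a : List Int) (lo : Nat) (h : lo < a.length) :
    sg a lo (lo + 1) = [a[lo]] := by
  rw [sg_cons a lo (lo + 1) (by omega) h]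
  simp [sg]

theorem sg_snoc (a : List Int) (lo t : Nat) (h1 : lo ≤ t) (h2 : t < a.length) :
    sg a lo (t + 1) = sg a lo t ++ [a[t]] := by
  unfold sg
  have h3 : t + 1 - lo = (t - lo) + 1 := by omega
  rw [h3, List.take_add_one]
  congr 1
  have h4 : t - lo < (a.drop lo).length := by simp; omega
  rw [List.getElem?_eq_getElem h4]
  simp [List.getElem_drop]
  congr 1
  omega

theorem sg_append (a : List Int) (lo mid hi : Nat) (h1 : lo ≤ mid) (h2 : mid ≤ hi) :
    sg a lo hi = sg a lo mid ++ sg a mid hi := by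
  unfold sg
  have h3 : hi - lo = (mid - lo) + (hi - mid) := by omega
  rw [h3, List.take_add, List.drop_drop]
  have h4 : lo + (mid - lo) = mid := by omega
  rw [h4]

-- mod helpers (M a variable: omega cannot be used on % by a variable)
theorem mod_succ_of_ne (j M : Nat) (hM : 2 ≤ M) (h : j % M ≠ M - 1) :
    (j + 1) % M = j % M + 1 := by
  have h1 : j % M < M := Nat.mod_lt _ (by omega)
  rw [Nat.add_mod, Nat.mod_eq_of_lt (show 1 < M by omega), Nat.mod_eq_of_lt (show j % M + 1 < M by omega)]

theorem mod_add_sub_one (i M : Nat) (hM : 2 ≤ M) :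
    (i + M - 1) % M = if i % M = 0 then M - 1 else i % M - 1 := by
  have h1 : i % M < M := Nat.mod_lt _ (by omega)
  have h2 : i + M - 1 = i + (M - 1) := by omega
  rw [h2, Nat.add_mod, Nat.mod_eq_of_lt (show M - 1 < M by omega)]
  by_cases h0 : i % M = 0
  · rw [h0, if_pos rfl]
    simp [Nat.mod_eq_of_lt (show M - 1 < M by omega)]
  · rw [if_neg h0]
    have h3 : i % M + (M - 1) = M + (i % M - 1) := by omega
    rw [h3, Nat.add_mod_left, Nat.mod_eq_of_lt (by omega)]

theorem mod_succ_of_eq (j M : Nat) (hM : 2 ≤ M) (h : j % M = M - 1) : (j + 1) % M = 0 := by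
  rw [Nat.add_mod, Nat.mod_eq_of_lt (show 1 < M by omega), h]
  have h2 : M - 1 + 1 = M := by omega
  rw [h2]
  simp

theorem countdown_snoc (a b : Int) (h : b < a) :
    PySem.List.pyRange a b (-1) = PySem.List.pyRange a (b + 1) (-1) ++ [b + 1] := by
  rw [PySem.List.pyRange_neg_one_eq_reverse a b, PySem.List.pyRange_neg_one_eq_reverse a (b + 1),
      PySem.List.pyRange_one_cons (show b + 1 < a + 1 by omega)]
  simp

-- the pre-array loop body (definitionally the fold body inside pair_sum_count_alt)
def preStep (a : List Int) (m : Int) (pre : List (Int × Option Int)) (j : Int) :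
    List (Int × Option Int) :=
  if PySem.Int.mod j m = 0 then pre ++ [(PySem.List.pyGetD a j 0, (none : Option Int))]
  else pre ++ [pushT2 (PySem.List.pyGetD pre (-1) (0, none)) (PySem.List.pyGetD a j 0)]

theorem pre_inv (a : List Int) (m : Int) (hm : 2 ≤ m) (t : Nat) (ht : t ≤ a.length) :
    ((PySem.List.pyRange 0 (t : Int) 1).foldl (preStep a m) []).length = t ∧
    ∀ j : Nat, j < t →
      ((PySem.List.pyRange 0 (t : Int) 1).foldl (preStep a m) [])[j]? =
        some (T2 (sg a (j - j % m.toNat) (j + 1))) := by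
  set M := m.toNat with hMdef
  have hMm : (M : Int) = m := Int.toNat_of_nonneg (by omega)
  have hM2 : 2 ≤ M := by omega
  induction t with
  | zero => simp [PySem.List.pyRange_one_eq_nil]
  | succ t ih =>
    obtain ⟨ihl, ihe⟩ := ih (by omega)
    have hcast : ((t + 1 : Nat) : Int) = (t : Int) + 1 := by push_cast; ring
    rw [hcast, PySem.List.pyRange_one_succ_right (by positivity), List.foldl_append]
    set P := (PySem.List.pyRange 0 (t : Int) 1).foldl (preStep a m) [] with hP
    have hmodc : PySem.Int.mod (t : Int) m = ((t % M : Nat) : Int) := by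
      rw [PySem.Int.mod_eq_emod_of_pos (by omega), ← hMm]
      push_cast
      rfl
    have htN : t < a.length := by omega
    have hget : PySem.List.pyGetD a (t : Int) 0 = a[t] := by
      rw [PySem.List.pyGetD_natCast, List.getD_eq_getElem a 0 htN]
    simp only [List.foldl_cons, List.foldl_nil]
    by_cases h0 : t % M = 0
    · have hstep : preStep a m P (t : Int) = P ++ [(a[t], none)] := by
        unfold preStep
        rw [if_pos (by rw [hmodc, h0]; rfl), hget]
      rw [hstep]
      constructor
      · simp [ihl]
      · intro j hj
        rcases Nat.lt_or_ge j t with hjt | hjt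
        · rw [List.getElem?_append_left (by rw [ihl]; exact hjt)]
          exact ihe j hjt
        · have hjeq : j = t := by omega
          subst hjeq
          have hcl := List.getElem?_concat_length (l := P) (a := ((a[j] : Int), (none : Option Int)))
          rw [ihl] at hcl
          rw [hcl]
          rw [h0, Nat.sub_zero, sg_singleton a j htN, T2_single]
    · have ht1 : 1 ≤ t := by
        rcases Nat.eq_zero_or_pos t with h | h
        · exfalso; apply h0; rw [h]; simp
        · omega
      have hPne : P ≠ [] := by
        intro he
        rw [he] at ihl
        simp at ihl
        omega
      have hm1 : (t - 1) % M = t % M - 1 := by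
        by_cases hcase : (t - 1) % M = M - 1
        · exfalso
          have := mod_succ_of_eq (t - 1) M hM2 hcase
          rw [show t - 1 + 1 = t by omega] at this
          exact h0 this
        · have := mod_succ_of_ne (t - 1) M hM2 hcase
          rw [show t - 1 + 1 = t by omega] at this
          omega
      have hlast : PySem.List.pyGetD P (-1) (0, none) = T2 (sg a (t - t % M) t) := by
        rw [PySem.List.pyGetD_neg_one P (0, none) hPne, List.getLast_eq_getElem]
        have hidx : P.length - 1 = t - 1 := by omega
        have := ihe (t - 1) (by omega)
        rw [List.getElem?_eq_getElem (by omega)] at this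
        have h2 := Option.some.inj this
        simp only [ihl]
        rw [h2]
        have hle := Nat.mod_le t M
        have harg1 : t - 1 - (t - 1) % M = t - t % M := by omega
        have harg2 : t - 1 + 1 = t := by omega
        rw [harg1, harg2]
      have hsgne : sg a (t - t % M) t ≠ [] := by
        have hml : t % M ≤ t := Nat.mod_le t M
        have hmp : 0 < t % M := by omega
        exact sg_ne_nil a _ t (by omega) (by omega)
      have hstep : preStep a m P (t : Int) = P ++ [T2 (sg a (t - t % M) (t + 1))] := by
        unfold preStep
        rw [if_neg (by rw [hmodc]; intro hh; apply h0; exact_mod_cast hh)]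
        rw [hget, hlast, push_T2 _ _ hsgne, sg_snoc a (t - t % M) t (by omega) htN]
      rw [hstep]
      constructor
      · simp [ihl]
      · intro j hj
        rcases Nat.lt_or_ge j t with hjt | hjt
        · rw [List.getElem?_append_left (by rw [ihl]; exact hjt)]
          exact ihe j hjt
        · have hjeq : j = t := by omega
          subst hjeq
          have hcl := List.getElem?_concat_length (l := P) (a := T2 (sg a (j - j % M) (j + 1)))
          rw [ihl] at hcl
          rw [hcl]

def cap (N M j : Nat) : Nat := min (j - j % M + M) N

-- the suffix-array loop body (definitionally the fold body inside pair_sum_count_alt)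
def sufStep (a : List Int) (m n : Int) (s : List (Int × Option Int)) (j : Int) :
    List (Int × Option Int) :=
  if PySem.Int.mod j m = m - 1 ∨ j = n - 1 then s ++ [(PySem.List.pyGetD a j 0, (none : Option Int))]
  else s ++ [pushT2 (PySem.List.pyGetD s (-1) (0, none)) (PySem.List.pyGetD a j 0)]

theorem suf_inv (a : List Int) (m : Int) (hm : 2 ≤ m) (t : Nat) (ht : t ≤ a.length) :
    ((PySem.List.pyRange ((a.length : Int) - 1) ((a.length : Int) - 1 - (t : Int)) (-1)).foldl
      (sufStep a m (a.length : Int)) []).length = t ∧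
    ∀ l : Nat, l < t →
      ((PySem.List.pyRange ((a.length : Int) - 1) ((a.length : Int) - 1 - (t : Int)) (-1)).foldl
        (sufStep a m (a.length : Int)) [])[l]? =
        some (T2 (sg a (a.length - 1 - l) (cap a.length m.toNat (a.length - 1 - l)))) := by
  set M := m.toNat with hMdef
  set N := a.length with hNdef
  have hMm : (M : Int) = m := Int.toNat_of_nonneg (by omega)
  have hM2 : 2 ≤ M := by omega
  induction t with
  | zero =>
    rw [show ((N : Int) - 1 - ((0 : Nat) : Int)) = (N : Int) - 1 by push_cast; ring]
    rw [PySem.List.pyRange_neg_one_eq_nil (by omega)]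
    simp
  | succ t ih =>
    obtain ⟨ihl, ihe⟩ := ih (by omega)
    have htN : t < N := by omega
    have hJ : ((N - 1 - t : Nat) : Int) = (N : Int) - 1 - (t : Int) := by
      push_cast [show t ≤ N - 1 by omega]; ring_nf; omega
    set J : Nat := N - 1 - t with hJdef
    have hsplit : PySem.List.pyRange ((N : Int) - 1) ((N : Int) - 1 - ((t + 1 : Nat) : Int)) (-1) =
        PySem.List.pyRange ((N : Int) - 1) ((N : Int) - 1 - (t : Int)) (-1) ++ [(J : Int)] := by
      rw [countdown_snoc _ _ (by push_cast; omega),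
          show (N : Int) - 1 - ((t + 1 : Nat) : Int) + 1 = (N : Int) - 1 - (t : Int) by push_cast; ring,
          ← hJ]
    rw [hsplit, List.foldl_append]
    set S := (PySem.List.pyRange ((N : Int) - 1) ((N : Int) - 1 - (t : Int)) (-1)).foldl
      (sufStep a m (N : Int)) [] with hS
    simp only [List.foldl_cons, List.foldl_nil]
    have hJN : J < N := by omega
    have hget : PySem.List.pyGetD a (J : Int) 0 = a[J] := by
      rw [PySem.List.pyGetD_natCast, List.getD_eq_getElem a 0 hJN]
    have hmodc : PySem.Int.mod (J : Int) m = ((J % M : Nat) : Int) := by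
      rw [PySem.Int.mod_eq_emod_of_pos (by omega), ← hMm]
      push_cast
      rfl
    have hcond : (PySem.Int.mod (J : Int) m = m - 1 ∨ (J : Int) = (N : Int) - 1) ↔
        (J % M = M - 1 ∨ J = N - 1) := by
      rw [hmodc, ← hMm]
      constructor
      · rintro (h | h)
        · left
          have : ((J % M : Nat) : Int) = ((M - 1 : Nat) : Int) := by
            rw [h]; push_cast [show 1 ≤ M by omega]; ring
          exact_mod_cast this
        · right; omega
      · rintro (h | h)
        · left; rw [h]; push_cast [show 1 ≤ M by omega]; ring
        · right; omega
    have hmodlt : J % M < M := Nat.mod_lt _ (by omega)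
    have hmodle : J % M ≤ J := Nat.mod_le _ _
    by_cases hc : J % M = M - 1 ∨ J = N - 1
    · have hstep : sufStep a m (N : Int) S (J : Int) = S ++ [(a[J], none)] := by
        unfold sufStep
        rw [if_pos (hcond.2 hc), hget]
      have hcap : cap N M J = J + 1 := by
        unfold cap
        rcases hc with h | h
        · omega
        · omega
      rw [hstep]
      refine ⟨by simp [ihl], ?_⟩
      intro l hl
      rcases Nat.lt_or_ge l t with hlt | hge
      · rw [List.getElem?_append_left (by rw [ihl]; exact hlt)]
        exact ihe l hlt
      · have hleq : l = t := by omega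
        subst hleq
        have hcl := List.getElem?_concat_length (l := S) (a := ((a[J] : Int), (none : Option Int)))
        rw [ihl] at hcl
        rw [hcl]
        rw [show N - 1 - l = J from rfl, hcap, sg_singleton a J hJN, T2_single]
    · push_neg at hc
      obtain ⟨hc1, hc2⟩ := hc
      have ht1 : 1 ≤ t := by
        rcases Nat.eq_zero_or_pos t with h | h
        · exfalso; exact hc2 (by omega)
        · omega
      have hSne : S ≠ [] := by
        intro he; rw [he] at ihl; simp at ihl; omega
      have hJsucc : (J + 1) % M = J % M + 1 := mod_succ_of_ne J M hM2 hc1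
      have hcapeq : cap N M (J + 1) = cap N M J := by
        unfold cap
        rw [hJsucc]
        omega
      have hcapJ2 : J + 2 ≤ cap N M J := by
        unfold cap
        omega
      have hlast : PySem.List.pyGetD S (-1) (0, none) = T2 (sg a (J + 1) (cap N M J)) := by
        rw [PySem.List.pyGetD_neg_one S (0, none) hSne, List.getLast_eq_getElem]
        have := ihe (t - 1) (by omega)
        rw [List.getElem?_eq_getElem (by omega)] at this
        have h2 := Option.some.inj this
        simp only [ihl]
        rw [h2]
        have harg : N - 1 - (t - 1) = J + 1 := by omega
        rw [harg, hcapeq]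
      have hsgne : sg a (J + 1) (cap N M J) ≠ [] :=
        sg_ne_nil a _ _ (by omega) (by omega)
      have hstep : sufStep a m (N : Int) S (J : Int) = S ++ [T2 (sg a J (cap N M J))] := by
        unfold sufStep
        rw [if_neg (by intro h; rcases hcond.1 h with h | h; exact hc1 h; exact hc2 h)]
        rw [hget, hlast, push_T2 _ _ hsgne]
        have hT : T2 (sg a (J + 1) (cap N M J) ++ [a[J]]) = T2 (sg a J (cap N M J)) := by
          rw [T2_perm (List.perm_append_singleton _ _)]
          rw [sg_cons a J (cap N M J) (by omega) hJN]
        rw [hT]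
      rw [hstep]
      refine ⟨by simp [ihl], ?_⟩
      intro l hl
      rcases Nat.lt_or_ge l t with hlt | hge
      · rw [List.getElem?_append_left (by rw [ihl]; exact hlt)]
        exact ihe l hlt
      · have hleq : l = t := by omega
        subst hleq
        have hcl := List.getElem?_concat_length (l := S) (a := T2 (sg a J (cap N M J)))
        rw [ihl] at hcl
        rw [hcl]


theorem foldl_id {α β : Type} (l : List α) (init : β) :
    l.foldl (fun c _ => c) init = init := by
  induction l generalizing init with
  | nil => rfl
  | cons x t ih => exact ih init

def preArr (a : List Int) (m : Int) : List (Int × Option Int) :=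
  (PySem.List.pyRange 0 (a.length : Int) 1).foldl (preStep a m) []

def sufArr (a : List Int) (m : Int) : List (Int × Option Int) :=
  ((PySem.List.pyRange ((a.length : Int) - 1) (-1) (-1)).foldl
    (sufStep a m (a.length : Int)) []).reverse

theorem preArr_get (a : List Int) (m : Int) (hm : 2 ≤ m) (e : Nat) (he : e < a.length) :
    (preArr a m)[e]? = some (T2 (sg a (e - e % m.toNat) (e + 1))) :=
  (pre_inv a m hm a.length le_rfl).2 e he

theorem sufArr_get (a : List Int) (m : Int) (hm : 2 ≤ m) (i : Nat) (hi : i < a.length) :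
    (sufArr a m)[i]? = some (T2 (sg a i (cap a.length m.toNat i))) := by
  unfold sufArr
  obtain ⟨hlen, hel⟩ := suf_inv a m hm a.length le_rfl
  rw [show (a.length : Int) - 1 - ((a.length : Nat) : Int) = -1 by push_cast; ring] at hlen hel
  rw [List.getElem?_reverse (by rw [hlen]; exact hi), hlen]
  have h2 := hel (a.length - 1 - i) (by omega)
  rw [show a.length - 1 - (a.length - 1 - i) = i by omega] at h2
  exact h2

theorem getD_of_getElem? {α : Type} {l : List α} {i : Nat} {d x : α} (h : l[i]? = some x) :
    l.getD i d = x := by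
  have hlt : i < l.length := by
    by_contra hc
    rw [List.getElem?_eq_none (by omega)] at h
    cases h
  rw [List.getD_eq_getElem l d hlt]
  rw [List.getElem?_eq_getElem hlt] at h
  exact Option.some.inj h

theorem max?_id_eq (l : List Int) (h : l ≠ []) :
    PySem.List.max? l (fun y => y) = some (Mx l) := by
  cases l with
  | nil => exact absurd rfl h
  | cons x t => exact PySem.List.max?_id_cons x t

def winStep (a : List Int) (m k : Int) (c : Int) (i : Int) : Int :=
  if Mx (sg a i.toNat (i.toNat + m.toNat)) + M2 (sg a i.toNat (i.toNat + m.toNat)) ≥ k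
  then c + 1 else c

theorem window_T2 (a : List Int) (m : Int) (hm : 2 ≤ m) (hmn : m ≤ (a.length : Int))
    (I : Nat) (hI : (I : Int) < (a.length : Int) - m + 1) :
    (if PySem.Int.mod (I : Int) m = 0 then PySem.List.pyGetD (preArr a m) ((I : Int) + m - 1) (0, none)
     else mergeT2 (PySem.List.pyGetD (sufArr a m) (I : Int) (0, none))
                  (PySem.List.pyGetD (preArr a m) ((I : Int) + m - 1) (0, none)))
    = T2 (sg a I (I + m.toNat)) := by
  set M := m.toNat with hMdef
  have hMm : (M : Int) = m := Int.toNat_of_nonneg (by omega)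
  set N := a.length with hNdef
  have hM2 : 2 ≤ M := by omega
  have hIM : I + M ≤ N := by omega
  have hIN : I < N := by omega
  have hE : ((I + M - 1 : Nat) : Int) = (I : Int) + m - 1 := by
    rw [Nat.cast_sub (by omega), Nat.cast_add, hMm]
    rfl
  set E := I + M - 1 with hEdef
  have hEN : E < N := by omega
  have hpreE : PySem.List.pyGetD (preArr a m) ((I : Int) + m - 1) (0, none) =
      T2 (sg a (E - E % M) (E + 1)) := by
    rw [← hE, PySem.List.pyGetD_natCast]
    exact getD_of_getElem? (preArr_get a m hm E hEN)
  have hmodc : PySem.Int.mod (I : Int) m = ((I % M : Nat) : Int) := by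
    rw [PySem.Int.mod_eq_emod_of_pos (by omega), ← hMm]
    push_cast
    rfl
  by_cases h0 : I % M = 0
  · rw [if_pos (by rw [hmodc, h0]; rfl), hpreE]
    have hEm : E % M = M - 1 := by
      rw [hEdef, mod_add_sub_one I M hM2, if_pos h0]
    rw [hEm, show E - (M - 1) = I by omega, show E + 1 = I + M by omega]
  · rw [if_neg (by rw [hmodc]; intro hh; exact h0 (by exact_mod_cast hh))]
    have hr1 : 1 ≤ I % M := Nat.one_le_iff_ne_zero.2 h0
    have hrM : I % M < M := Nat.mod_lt _ (by omega)
    have hrI : I % M ≤ I := Nat.mod_le _ _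
    have hsuf : PySem.List.pyGetD (sufArr a m) ((I : Int)) (0, none) =
        T2 (sg a I (I - I % M + M)) := by
      rw [PySem.List.pyGetD_natCast]
      have h := sufArr_get a m hm I hIN
      have hcap : cap N M I = I - I % M + M := by unfold cap; omega
      rw [hcap] at h
      exact getD_of_getElem? h
    have hEm : E % M = I % M - 1 := by
      rw [hEdef, mod_add_sub_one I M hM2, if_neg h0]
    have hpre2 : PySem.List.pyGetD (preArr a m) ((I : Int) + m - 1) (0, none) =
        T2 (sg a (I - I % M + M) (I + M)) := by
      rw [hpreE, hEm, show E - (I % M - 1) = I - I % M + M by omega,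
          show E + 1 = I + M by omega]
    rw [hsuf, hpre2,
        merge_T2 _ _ (sg_ne_nil a I _ (by omega) (by omega))
          (sg_ne_nil a _ _ (by omega) (by omega)),
        ← sg_append a I (I - I % M + M) (I + M) (by omega) (by omega)]

theorem A_eval (a : List Int) (m k : Int) (hm : 2 ≤ m) (hmn : m ≤ (a.length : Int)) :
    pair_sum_count a m k =
      (PySem.List.pyRange 0 ((a.length : Int) - m + 1) 1).foldl (winStep a m k) 0 := by
  unfold pair_sum_count
  rw [PySem.List.pyRange_one_append 0 ((a.length : Int) - m + 1) (a.length : Int)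
        (by omega) (by omega),
      List.foldl_append]
  set M := m.toNat with hMdef
  have hMm : (M : Int) = m := Int.toNat_of_nonneg (by omega)
  have hM2 : 2 ≤ M := by omega
  have htail : ∀ init : Int,
      (PySem.List.pyRange ((a.length : Int) - m + 1) (a.length : Int) 1).foldl
        (fun count i =>
          if ((a.length : Int) - i) > (m - 1) then
            let sub_array := (PySem.List.pyRange 0 m 1).foldl
              (fun s j => s ++ [PySem.List.pyGetD a (i + j) 0]) []
            match PySem.List.max? sub_array (fun y => y) with
            | none => count
            | some firstMax =>
              match PySem.List.remove? sub_array firstMax with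
              | none => count
              | some rest =>
                match PySem.List.max? rest (fun y => y) with
                | none => count
                | some secondMax => if firstMax + secondMax ≥ k then count + 1 else count
          else count) init = init := by
    intro init
    rw [PySem.List.foldl_congr_mem _ _ (fun c _ => c) init ?_, foldl_id]
    intro acc i hi
    rw [PySem.List.mem_pyRange_one] at hi
    rw [if_neg (by omega)]
  rw [htail]
  apply PySem.List.foldl_congr_mem
  intro acc i hi
  rw [PySem.List.mem_pyRange_one] at hi
  obtain ⟨I, rfl⟩ : ∃ I : Nat, ((I : Nat) : Int) = i := ⟨i.toNat, Int.toNat_of_nonneg hi.1⟩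
  have hIM : I + M ≤ a.length := by omega
  rw [if_pos (by omega)]
  have hwlen : (sg a I (I + M)).length = M := by
    rw [sg_length a I (I + M) (by omega) hIM]; omega
  have hwne : sg a I (I + M) ≠ [] :=
    sg_ne_nil a I (I + M) (by omega) (by omega)
  have hsub : (PySem.List.pyRange 0 m 1).foldl
      (fun s j => s ++ [PySem.List.pyGetD a (((I : Nat) : Int) + j) 0]) [] = sg a I (I + M) := by
    rw [PySem.List.foldl_append_singleton_eq_map, List.nil_append, PySem.List.pyRange_one,
        List.map_map]
    apply List.ext_getElem
    · simpa [sg] using by omega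
    · intro idx h1 h2
      simp only [List.getElem_map, List.getElem_range, Function.comp]
      rw [show (0 : Int) + (idx : Int) = ((idx : Nat) : Int) by ring,
          show ((I : Nat) : Int) + ((idx : Nat) : Int) = ((I + idx : Nat) : Int) by push_cast; ring,
          PySem.List.pyGetD_natCast,
          List.getD_eq_getElem a 0 (by simp at h1; omega)]
      unfold sg
      rw [List.getElem_take, List.getElem_drop]
  simp only [hsub]
  have herase_ne : (sg a I (I + M)).erase (Mx (sg a I (I + M))) ≠ [] := by
    intro he
    have := List.length_erase_of_mem (Mx_mem _ hwne)
    rw [he] at this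
    simp at this
    omega
  simp only [max?_id_eq _ hwne, PySem.List.remove?_eq_some_erase _ _ (Mx_mem _ hwne),
      max?_id_eq _ herase_ne]
  simp only [winStep, Int.toNat_natCast]
  rfl

theorem alt_eval (a : List Int) (m k : Int) (hm : 2 ≤ m) (hmn : m ≤ (a.length : Int)) :
    pair_sum_count_alt a m k =
      (PySem.List.pyRange 0 ((a.length : Int) - m + 1) 1).foldl (winStep a m k) 0 := by
  have hB : pair_sum_count_alt a m k =
      (if m < 2 ∨ (a.length : Int) < m then (0 : Int) else
        (PySem.List.pyRange 0 ((a.length : Int) - m + 1) 1).foldl (fun count i =>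
          match (if PySem.Int.mod i m = 0 then PySem.List.pyGetD (preArr a m) (i + m - 1) (0, none)
                 else mergeT2 (PySem.List.pyGetD (sufArr a m) i (0, none))
                              (PySem.List.pyGetD (preArr a m) (i + m - 1) (0, none))).2 with
          | none => count
          | some lo =>
            if (if PySem.Int.mod i m = 0 then PySem.List.pyGetD (preArr a m) (i + m - 1) (0, none)
                else mergeT2 (PySem.List.pyGetD (sufArr a m) i (0, none))
                             (PySem.List.pyGetD (preArr a m) (i + m - 1) (0, none))).1 + lo ≥ k
            then count + 1 else count) 0) := rfl
  rw [hB, if_neg (by omega)]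
  apply PySem.List.foldl_congr_mem
  intro acc i hi
  rw [PySem.List.mem_pyRange_one] at hi
  obtain ⟨I, rfl⟩ : ∃ I : Nat, ((I : Nat) : Int) = i := ⟨i.toNat, Int.toNat_of_nonneg hi.1⟩
  rw [window_T2 a m hm hmn I hi.2]
  have hIM : I + m.toNat ≤ a.length := by
    have hMm : (m.toNat : Int) = m := Int.toNat_of_nonneg (by omega)
    omega
  have hwlen : 2 ≤ (sg a I (I + m.toNat)).length := by
    rw [sg_length a I (I + m.toNat) (by omega) hIM]
    have hMm : (m.toNat : Int) = m := Int.toNat_of_nonneg (by omega)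
    omega
  rw [T2_two _ hwlen]
  simp only [winStep, Int.toNat_natCast]
  rfl

theorem main_eq (a : List Int) (m k : Int) (hpre : a = [] ∨ 2 ≤ m) :
    pair_sum_count a m k = pair_sum_count_alt a m k := by
  rcases hpre with rfl | hm
  · unfold pair_sum_count pair_sum_count_alt
    rw [if_pos (by simp; omega)]
    rw [show ((List.length ([] : List Int) : Int)) = 0 by simp,
        PySem.List.pyRange_one_eq_nil le_rfl]
    rfl
  · by_cases hmn : (a.length : Int) < m
    · unfold pair_sum_count pair_sum_count_alt
      rw [if_pos (Or.inr hmn)]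
      rw [PySem.List.foldl_congr_mem _ _ (fun c _ => c) 0 ?_, foldl_id]
      intro acc i hi
      rw [PySem.List.mem_pyRange_one] at hi
      rw [if_neg (by omega)]
    · rw [A_eval a m k hm (by omega), alt_eval a m k hm (by omega)]

-- ===== VERDICT (by name: the statement is the Claim_ definition above) =====
theorem pair_sum_count_spec : Claim_equal_pair_sum_count := by
  intro a m k _ hpre
  exact main_eq a m k hpre
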